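-- pv_equiv track=rewrite | github.com/Kimyechan/codingTestPractice | programmers/Binary Search/입국 심사.py | solution
-- ===== SOURCE A (Python) =====
-- def solution(n, times):
--     answer = 0
--
--     start = 1
--     end = n * max(times)
--
--     while start <= end:
--         checkAll = 0
--         mid = (start + end) // 2
--
--         for time in times:
--             checkPerOne = mid // time
--             checkAll += checkPerOne
--             if n <= checkAll:
--                 answer = mid
--                 end = mid - 1
--                 break
--
--         if n > checkAll:
--             start = mid + 1
--
--     return answer
-- ===== SOURCE B (Python) =====
-- def solution(n, times):
--     m = max(times)
--     if n <= 0: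
--         return 0
--
--     def feasible(x):
--         return sum(x // t for t in times) >= n
--
--     def search(lo, hi):
--         if lo >= hi:
--             return lo
--         mid = (lo + hi) // 2
--         if feasible(mid):
--             return search(lo, mid)
--         return search(mid + 1, hi)
--
--     return search(1, n * m)
-- ===== Notes on version B (the rewrite author's own statement) =====
-- stated objective: alternative
-- what changed: Replaces A's mutable answer/start/end loop with an early-breaking inner scan by an explicit monotone feasibility predicate (full sum per probe) and a recursive lower-bound binary search search(lo,hi) returning lo at lo>=hi, with an up-front n<=0 short-circuit.
-- outside the precondition, e.g. on solution(0, []): A raises ValueError, B raises ValueError; on solution(3, [0, 5]): A raises ZeroDivisionError, B raises ZeroDivisionError; on solution(2, [-3, 2]): A returns 0, B returns 4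
import Mathlib
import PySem

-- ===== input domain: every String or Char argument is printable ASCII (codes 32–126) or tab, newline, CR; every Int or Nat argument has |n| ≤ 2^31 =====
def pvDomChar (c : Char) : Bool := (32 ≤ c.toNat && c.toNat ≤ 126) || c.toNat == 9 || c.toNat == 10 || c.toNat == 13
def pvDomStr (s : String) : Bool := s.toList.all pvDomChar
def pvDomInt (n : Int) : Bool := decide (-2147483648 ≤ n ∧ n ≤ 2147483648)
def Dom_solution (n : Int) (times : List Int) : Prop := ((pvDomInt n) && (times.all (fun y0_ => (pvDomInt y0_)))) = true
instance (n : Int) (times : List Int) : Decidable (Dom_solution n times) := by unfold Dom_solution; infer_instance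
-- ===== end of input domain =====

-- B replaces A's iterative answer/start/end loop with a monotone feasibility predicate and a
-- plain recursive lower-bound binary search (objective: alternative decomposition, same cost).

-- ===== PORT A =====
-- inner 'for time in times' loop: returns (checkAll, broke); on break the caller sets answer/end
def pvInnerA (n x : Int) : List Int → Int → Int × Bool
  | [], checkAll => (checkAll, false)
  | t :: ts, checkAll =>
    let checkAll' := checkAll + PySem.Int.floordiv x t
    if n ≤ checkAll' then (checkAll', true) else pvInnerA n x ts checkAll'

-- the 'while start <= end' loop of A; fuel is a totalization guard only (one unit per
-- iteration; solution passes enough fuel for the whole search, since e+1-start shrinks each turn)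
def pvLoopA (n : Int) (times : List Int) : Nat → Int → Int → Int → Int
  | 0, answer, _, _ => answer  -- fuel exhausted; never reached with the fuel solution passes
  | fuel + 1, answer, start, e =>
    if start ≤ e then
      let mid := PySem.Int.floordiv (start + e) 2
      match pvInnerA n mid times 0 with
      | (checkAll, true) =>
          -- break fired: answer := mid, end := mid - 1; then Python re-tests 'if n > checkAll'
          if n > checkAll then pvLoopA n times fuel mid (mid + 1) (mid - 1)
          else pvLoopA n times fuel mid start (mid - 1)
      | (checkAll, false) =>
          if n > checkAll then pvLoopA n times fuel answer (mid + 1) e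
          else answer  -- here Python's loop makes no progress (diverges); unreachable under Pre_
    else answer

def solution (n : Int) (times : List Int) : Int :=
  match PySem.List.max? times (fun t => t) with
  | none => 0  -- max(times) raises ValueError on [] (excluded by Pre_)
  | some m => pvLoopA n times (n * m + 1).toNat 0 1 (n * m)

-- ===== PORT B =====
-- feasible(x) = sum(x // t for t in times) >= n
def pvFeasible (n : Int) (times : List Int) (x : Int) : Bool :=
  decide (n ≤ (times.map (fun t => PySem.Int.floordiv x t)).sum)

-- search(lo, hi): smallest feasible value in [lo, hi], assuming feasible(hi);
-- fuel is a totalization guard only (hi - lo shrinks every call; solution_alt passes enough)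
def pvSearchB (n : Int) (times : List Int) : Nat → Int → Int → Int
  | 0, lo, _ => lo  -- fuel exhausted; never reached with the fuel solution_alt passes
  | fuel + 1, lo, hi =>
    if lo < hi then
      let mid := PySem.Int.floordiv (lo + hi) 2
      if pvFeasible n times mid then pvSearchB n times fuel lo mid
      else pvSearchB n times fuel (mid + 1) hi
    else lo

def solution_alt (n : Int) (times : List Int) : Int :=
  match PySem.List.max? times (fun t => t) with
  | none => 0  -- Source B's max(times) raises ValueError on [] (excluded by Pre_)
  | some m => if n ≤ 0 then 0 else pvSearchB n times (n * m).toNat 1 (n * m)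

-- ===== PRECONDITION & SPEC =====
-- Pre_ restricts to the task's natural domain — a nonempty list of strictly positive service times —
-- plus every input whose search range is empty (n = 0, or n < 0 with some nonnegative time), where A
-- trivially returns 0.  Excluded and why: [] (both programs raise ValueError in max); with n > 0, a 0
-- entry (A raises ZeroDivisionError) or a negative entry, outside the natural domain, where A's binary
-- search runs on a non-monotone predicate and its returned value is an accident of probe order; the
-- same for n < 0 with all times negative, where the probed range n*max(times) > 0 is again accidental.
def Pre_solution (n : Int) (times : List Int) : Prop :=
  times ≠ [] ∧ (times.all (fun t => decide (0 < t)) = true ∨ n = 0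
    ∨ (n < 0 ∧ times.any (fun t => decide (0 ≤ t)) = true))
instance (n : Int) (times : List Int) : Decidable (Pre_solution n times) := by unfold Pre_solution; infer_instance
def pvWitness_solution : Int × List Int := (6, [7, 10])

def Spec_solution (n : Int) (times : List Int) (out : Int) : Prop := out = solution_alt n times
instance (n : Int) (times : List Int) (out : Int) : Decidable (Spec_solution n times out) := by unfold Spec_solution; infer_instance

-- ===== CLAIM (what is proved, stated in full; the proofs are below) =====
def Claim_equal_solution : Prop := ∀ (n : Int) (times : List Int), Dom_solution n times → Pre_solution n times → Spec_solution n times (solution n times)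

-- ===== LEMMAS AND PROOFS =====

-- the total served by time x (the sum both programs compare against n)
def pvSum (times : List Int) (x : Int) : Int :=
  (times.map (fun t => PySem.Int.floordiv x t)).sum

lemma pvSum_mono {times : List Int} (hpos : ∀ t ∈ times, 0 < t) {x y : Int} (hxy : x ≤ y) :
    pvSum times x ≤ pvSum times y := by
  unfold pvSum
  apply List.sum_le_sum
  intro t ht
  rw [PySem.Int.floordiv_eq_ediv_of_pos (hpos t ht), PySem.Int.floordiv_eq_ediv_of_pos (hpos t ht)]
  exact Int.ediv_le_ediv (hpos t ht) hxy

lemma pvSum_zero {times : List Int} (hpos : ∀ t ∈ times, 0 < t) : pvSum times 0 = 0 := by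
  unfold pvSum
  apply List.sum_eq_zero
  intro a ha
  simp only [List.mem_map] at ha
  obtain ⟨t, ht, rfl⟩ := ha
  rw [PySem.Int.floordiv_eq_ediv_of_pos (hpos t ht)]
  simp

lemma pvSum_nonpos {times : List Int} (hpos : ∀ t ∈ times, 0 < t) {x : Int} (hx : x ≤ 0) :
    pvSum times x ≤ 0 := by
  have := pvSum_mono hpos hx
  rw [pvSum_zero hpos] at this
  exact this

lemma pvSum_nonneg {times : List Int} (hpos : ∀ t ∈ times, 0 < t) {x : Int} (hx : 0 ≤ x) :
    0 ≤ pvSum times x := by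
  have := pvSum_mono hpos hx
  rw [pvSum_zero hpos] at this
  exact this

-- feasibility at the upper bound n * max(times)
lemma pvSum_top {times : List Int} (hpos : ∀ t ∈ times, 0 < t) {m : Int} (hm : m ∈ times)
    {n : Int} (hn : 1 ≤ n) : n ≤ pvSum times (n * m) := by
  obtain ⟨l1, l2, rfl⟩ := List.append_of_mem hm
  have hmpos : 0 < m := hpos m hm
  have h1 : 0 ≤ pvSum l1 (n * m) :=
    pvSum_nonneg (fun t ht => hpos t (by simp [ht])) (by positivity)
  have h2 : 0 ≤ pvSum l2 (n * m) :=
    pvSum_nonneg (fun t ht => hpos t (by simp [ht])) (by positivity)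
  have hdiv : PySem.Int.floordiv (n * m) m = n := by
    rw [PySem.Int.floordiv_eq_ediv_of_pos hmpos]
    exact Int.mul_ediv_cancel n (ne_of_gt hmpos)
  have hsplit : pvSum (l1 ++ m :: l2) (n * m)
      = pvSum l1 (n * m) + (PySem.Int.floordiv (n * m) m + pvSum l2 (n * m)) := by
    simp [pvSum]
  omega

-- if the inner loop broke, checkAll had reached n
lemma pvInnerA_broke (n x : Int) : ∀ (ts : List Int) (acc : Int),
    (pvInnerA n x ts acc).2 = true → n ≤ (pvInnerA n x ts acc).1 := by
  intro ts
  induction ts with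
  | nil => intro acc h; simp [pvInnerA] at h
  | cons t ts ih =>
    intro acc h
    simp only [pvInnerA] at h ⊢
    split_ifs at h ⊢ with hle
    · exact hle
    · exact ih _ h

-- if the inner loop did not break, checkAll is the full sum
lemma pvInnerA_no_break (n x : Int) : ∀ (ts : List Int) (acc : Int),
    (pvInnerA n x ts acc).2 = false → (pvInnerA n x ts acc).1 = acc + pvSum ts x := by
  intro ts
  induction ts with
  | nil => intro acc _; simp [pvInnerA, pvSum]
  | cons t ts ih =>
    intro acc h
    simp only [pvInnerA] at h ⊢
    split_ifs at h ⊢ with hle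
    · rw [ih _ h]
      simp [pvSum]
      ring

-- A breaks out of the inner loop exactly when the mid value is feasible
lemma pvInnerA_spec {n x : Int} (hx : 0 ≤ x) : ∀ (ts : List Int), (∀ t ∈ ts, 0 < t) →
    ∀ acc, acc < n → ((pvInnerA n x ts acc).2 = true ↔ n ≤ acc + pvSum ts x) := by
  intro ts
  induction ts with
  | nil =>
    intro _ acc hacc
    simp [pvInnerA, pvSum]
    omega
  | cons t ts ih =>
    intro hpos acc hacc
    have hts : ∀ t' ∈ ts, 0 < t' := fun t' ht' => hpos t' (by simp [ht'])
    have hsplit : pvSum (t :: ts) x = PySem.Int.floordiv x t + pvSum ts x := by simp [pvSum]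
    simp only [pvInnerA]
    split_ifs with hle
    · have := pvSum_nonneg hts hx
      simp only [true_iff]
      omega
    · rw [ih hts _ (by omega)]
      constructor <;> intro h <;> omega

-- A's loop leaves answer unchanged once start > e
lemma pvLoopA_stop {n : Int} {times : List Int} {answer start e : Int} (h : e < start) :
    ∀ fuel, pvLoopA n times fuel answer start e = answer := by
  intro fuel
  cases fuel with
  | zero => rfl
  | succ fuel => simp [pvLoopA, not_le.mpr h]

-- A's while loop returns M, the least feasible time, under the binary-search invariant
lemma pvLoopA_eq {n : Int} {times : List Int} (hpos : ∀ t ∈ times, 0 < t) (hn : 1 ≤ n)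
    (M : Int) (hM : ∀ x, n ≤ pvSum times x ↔ M ≤ x) :
    ∀ (fuel : Nat) (answer start e : Int), (e + 1 - start).toNat ≤ fuel →
      1 ≤ start → start ≤ M → M ≤ e + 1 →
      (answer = e + 1 ∨ (answer = 0 ∧ M ≤ e)) → pvLoopA n times fuel answer start e = M := by
  intro fuel
  induction fuel with
  | zero =>
    intro answer start e hfuel h1 h2 h3 h4
    -- no fuel means e < start: the search is already finished and answer = M
    simp only [pvLoopA]
    omega
  | succ fuel ih =>
    intro answer start e hfuel h1 h2 h3 h4
    by_cases hse : start ≤ e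
    · have hmb := PySem.Int.floordiv_two_mid_bounds hse
      simp only [pvLoopA, if_pos hse]
      rcases hr : pvInnerA n (PySem.Int.floordiv (start + e) 2) times 0 with ⟨checkAll, b⟩
      set mid := PySem.Int.floordiv (start + e) 2 with hmid
      cases b with
      | true =>
        have hspec := pvInnerA_spec (n := n) (x := mid) (by omega) times hpos 0 (by omega)
        rw [hr] at hspec
        have hfeas : n ≤ 0 + pvSum times mid := hspec.mp rfl
        have hMmid : M ≤ mid := (hM mid).1 (by omega)
        have hb := pvInnerA_broke n mid times 0
        rw [hr] at hb
        have hb2 : n ≤ checkAll := hb rfl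
        simp only [if_neg (by omega : ¬ n > checkAll)]
        exact ih mid start (mid - 1) (by omega) h1 h2 (by omega) (by omega)
      | false =>
        have hval := pvInnerA_no_break n mid times 0
        rw [hr] at hval
        have hfull : checkAll = 0 + pvSum times mid := hval rfl
        have hnfeas : ¬ n ≤ pvSum times mid := by
          intro hc
          have hspec := pvInnerA_spec (n := n) (x := mid) (by omega) times hpos 0 (by omega)
          rw [hr] at hspec
          exact absurd (hspec.mpr (by omega)) (by simp)
        have hnM : ¬ M ≤ mid := fun hc => hnfeas ((hM mid).2 hc)
        simp only [if_pos (by omega : n > checkAll)]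
        exact ih answer (mid + 1) e (by omega) (by omega) (by omega) h3 h4
    · rw [pvLoopA_stop (by omega)]
      omega

-- B's recursive search returns M under the same invariant
lemma pvSearchB_eq {n : Int} {times : List Int}
    (M : Int) (hM : ∀ x, n ≤ pvSum times x ↔ M ≤ x) :
    ∀ (fuel : Nat) (lo hi : Int), (hi - lo).toNat ≤ fuel →
      lo ≤ M → M ≤ hi → pvSearchB n times fuel lo hi = M := by
  intro fuel
  induction fuel with
  | zero =>
    intro lo hi hfuel h1 h2
    simp only [pvSearchB]
    omega
  | succ fuel ih =>
    intro lo hi hfuel h1 h2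
    by_cases hlh : lo < hi
    · have hmb := PySem.Int.floordiv_two_mid_bounds (le_of_lt hlh)
      have hlt : PySem.Int.floordiv (lo + hi) 2 < hi :=
        (PySem.Int.floordiv_lt_iff_lt_mul (by omega)).2 (by omega)
      simp only [pvSearchB, if_pos hlh]
      set mid := PySem.Int.floordiv (lo + hi) 2 with hmid
      by_cases hf : pvFeasible n times mid
      · have hfeas : n ≤ pvSum times mid := by simpa [pvFeasible, pvSum] using hf
        simp only [if_pos hf]
        exact ih lo mid (by omega) h1 ((hM mid).1 hfeas)
      · have hnfeas : ¬ n ≤ pvSum times mid := by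
          simpa [pvFeasible, pvSum] using hf
        have hnM : ¬ M ≤ mid := fun hc => hnfeas ((hM mid).2 hc)
        simp only [if_neg hf]
        exact ih (mid + 1) hi (by omega) (by omega) h2
    · simp only [pvSearchB, if_neg hlh]
      omega

-- ===== VERDICT (by name: the statement is the Claim_ definition above) =====
theorem solution_spec : Claim_equal_solution := by
  intro n times _ hpre
  obtain ⟨hne, hdisj0⟩ := hpre
  have hdisj : (∀ t ∈ times, 0 < t) ∨ n = 0 ∨ (n < 0 ∧ ∃ t ∈ times, 0 ≤ t) := by
    rcases hdisj0 with h | h | ⟨h1, h2⟩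
    · exact Or.inl (by simpa using h)
    · exact Or.inr (Or.inl h)
    · exact Or.inr (Or.inr ⟨h1, by simpa using h2⟩)
  unfold Spec_solution solution solution_alt
  obtain ⟨m, hm⟩ : ∃ m, PySem.List.max? times (fun t => t) = some m := by
    cases h : PySem.List.max? times (fun t => t) with
    | none => exact absurd ((PySem.List.max?_eq_none_iff times (fun t => t)).mp h) hne
    | some m => exact ⟨m, rfl⟩
  have hmem : m ∈ times := PySem.List.max?_mem hm
  rw [hm]
  show pvLoopA n times (n * m + 1).toNat 0 1 (n * m)
      = if n ≤ 0 then 0 else pvSearchB n times (n * m).toNat 1 (n * m)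
  by_cases hn : n ≤ 0
  · -- end = n * max(times) ≤ 0 < start = 1: A's loop never runs, B returns 0 directly
    have hnm : n * m ≤ 0 := by
      rcases hdisj with hpos | h0 | ⟨hneg, t, ht, ht0⟩
      · have := hpos m hmem; nlinarith
      · simp [h0]
      · have htm : t ≤ m := PySem.List.max?_isMax hm t ht
        nlinarith
    rw [if_pos hn, pvLoopA_stop (by omega)]
  · have hn1 : 1 ≤ n := by omega
    have hpos : ∀ t ∈ times, 0 < t := by
      rcases hdisj with hpos | h0 | ⟨hneg, _⟩
      · exact hpos
      · omega
      · omega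
    have hmpos : 0 < m := hpos m hmem
    rw [if_neg hn]
    -- M := the least feasible time, via Nat.find on the feasible naturals
    have hex : ∃ k : ℕ, n ≤ pvSum times (k : Int) := by
      refine ⟨(n * m).toNat, ?_⟩
      rw [Int.toNat_of_nonneg (by positivity)]
      exact pvSum_top hpos hmem hn1
    have hMfeas : n ≤ pvSum times ((Nat.find hex : ℕ) : Int) := Nat.find_spec hex
    set M : Int := ((Nat.find hex : ℕ) : Int) with hMdef
    have hM : ∀ x, n ≤ pvSum times x ↔ M ≤ x := by
      intro x
      constructor
      · intro hfeas
        by_contra hlt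
        by_cases hx0 : x ≤ 0
        · have := pvSum_nonpos hpos hx0; omega
        · have hx0 : 0 < x := by omega
          have hxM : x.toNat < Nat.find hex := by omega
          have hmin : ¬ n ≤ pvSum times ((x.toNat : ℕ) : Int) := Nat.find_min hex hxM
          rw [Int.toNat_of_nonneg (le_of_lt hx0)] at hmin
          exact hmin hfeas
      · intro hle
        exact le_trans hMfeas (pvSum_mono hpos hle)
    have hM1 : 1 ≤ M := by
      by_contra hc
      have hfeas0 : n ≤ pvSum times 0 := (hM 0).2 (by omega)
      rw [pvSum_zero hpos] at hfeas0
      omega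
    have hMtop : M ≤ n * m := (hM (n * m)).1 (pvSum_top hpos hmem hn1)
    rw [pvLoopA_eq hpos hn1 M hM (n * m + 1).toNat 0 1 (n * m) (by omega) (by omega) hM1 (by omega) (by omega),
        pvSearchB_eq M hM (n * m).toNat 1 (n * m) (by omega) hM1 hMtop]
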